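-- pv_equiv track=rewrite | github.com/LymphV/PyTestIII | py243 whoiswho data/sign/utils.py | isShort
-- ===== SOURCE A (Python) =====
-- def isShort (name):
--     for x in name.split():
--         rst = True
--         for y in x.split('-'):
--             if not(len(y) == 2 and y.endswith('.') or len(y) == 1):
--                 rst = False
--                 break
--         if rst: return True
--     return False
-- ===== SOURCE B (Python) =====
-- def _tok(s):
--     # state machine over the token: one arbitrary non-hyphen char, an optional dot,
--     # then either the end or a hyphen and the same pattern again
--     if not s or s[0] == '-':
--         return False
--     rest = s[1:]
--     if rest[:1] == '.':
--         rest = rest[1:]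
--     if not rest:
--         return True
--     if rest[0] != '-':
--         return False
--     return _tok(rest[1:])
--
-- def isShort(name):
--     return any(_tok(x) for x in name.split())
-- ===== Notes on version B (the rewrite author's own statement) =====
-- stated objective: alternative
-- what changed: The inner split-on-hyphen plus per-part length/endswith test is replaced by a single left-to-right state machine over the token's characters (consume one non-hyphen character, an optional dot, then end or hyphen and repeat), so no part list is ever built.
import Mathlib
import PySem

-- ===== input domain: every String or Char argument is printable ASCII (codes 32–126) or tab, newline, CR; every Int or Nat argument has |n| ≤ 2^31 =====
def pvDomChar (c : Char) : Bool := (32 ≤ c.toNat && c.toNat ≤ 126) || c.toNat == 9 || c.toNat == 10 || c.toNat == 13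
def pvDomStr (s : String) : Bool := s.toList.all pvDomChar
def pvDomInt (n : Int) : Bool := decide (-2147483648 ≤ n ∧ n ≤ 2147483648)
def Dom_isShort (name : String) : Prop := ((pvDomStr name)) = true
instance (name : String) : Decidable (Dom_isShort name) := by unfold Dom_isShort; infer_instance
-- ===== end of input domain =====

-- B replaces A's split-on-hyphen-and-test inner loop by a single left-to-right state
-- machine over the token's characters (objective: alternative decomposition, same cost).

-- ===== PORT A =====
-- inner loop over the hyphen-separated parts, with A's early break as returning false
def isShortInner : List String → Bool
  | [] => true
  | y :: ys =>
    if !((PySem.Str.len y == 2 && PySem.Str.endswith y ".") || PySem.Str.len y == 1)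
    then false
    else isShortInner ys

-- outer loop over whitespace tokens, with A's early `return True`
def isShortOuter : List String → Bool
  | [] => false
  | x :: xs =>
    if isShortInner ((PySem.Str.split? x "-").getD []) then true else isShortOuter xs

def isShort (name : String) : Bool := isShortOuter (PySem.Str.split₀ name)

-- ===== PORT B =====
-- _tok from Source B: consume one non-hyphen character, an optional dot, then either the
-- end of the token or a hyphen and recurse (Source B's tail-recursive scan, written as
-- structural recursion with the optional-dot strip flattened into the patterns)
def tokB : List Char → Bool
  | [] => false
  | c :: rest =>
    if c = '-' then false
    else
      match rest with
      | [] => true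
      | ['.'] => true
      | '.' :: d :: r2 => if d = '-' then tokB r2 else false
      | d :: r2 => if d = '-' then tokB r2 else false

def isShort_alt (name : String) : Bool :=
  (PySem.Str.split₀ name).any (fun x => tokB x.toList)

-- ===== PRECONDITION & SPEC =====
def Spec_isShort (name : String) (out : Bool) : Prop := out = isShort_alt name
instance (name : String) (out : Bool) : Decidable (Spec_isShort name out) := by unfold Spec_isShort; infer_instance

-- ===== CLAIM (what is proved, stated in full; the proofs are below) =====
def Claim_equal_isShort : Prop := ∀ (name : String), Dom_isShort name → Spec_isShort name (isShort name)

-- ===== LEMMAS AND PROOFS =====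

-- A's per-part test, on char lists
def okL (p : List Char) : Bool :=
  ((p.length : Int) == 2 && PySem.Chars.endswith p ['.']) || (p.length : Int) == 1

-- reference split on hyphen, as plain structural recursion
def mySplit : List Char → List (List Char)
  | [] => [[]]
  | c :: rest =>
    if c = '-' then [] :: mySplit rest
    else
      match mySplit rest with
      | [] => [[c]]
      | h :: t => (c :: h) :: t

def consHead (p : List Char) : List (List Char) → List (List Char)
  | [] => [p]
  | h :: t => (p ++ h) :: t

theorem mySplit_ne_nil (cs : List Char) : mySplit cs ≠ [] := by
  cases cs with
  | nil => simp [mySplit]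
  | cons c rest =>
    simp only [mySplit]
    split
    · simp
    · rcases h : mySplit rest with _ | ⟨h0, t0⟩ <;> simp

theorem consHead_nil_of_ne (xs : List (List Char)) (h : xs ≠ []) : consHead [] xs = xs := by
  cases xs with
  | nil => exact absurd rfl h
  | cons a t => simp [consHead]

theorem go_eq (fuel : Nat) : ∀ (l cur : List Char) (acc : List (List Char)),
    l.length < fuel →
    PySem.Chars.splitOn.go ['-'] fuel l cur acc = acc.reverse ++ consHead cur.reverse (mySplit l) := by
  induction fuel with
  | zero => intro l cur acc h; omega
  | succ f ih =>
    intro l cur acc h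
    cases l with
    | nil => simp [PySem.Chars.splitOn.go, mySplit, consHead]
    | cons c rest =>
      by_cases hc : c = '-'
      · subst hc
        have hp : List.isPrefixOf ['-'] ('-' :: rest) = true := by simp [List.isPrefixOf]
        rw [PySem.Chars.splitOn.go, if_pos hp]
        have hd : List.drop (['-'].length) ('-' :: rest) = rest := by simp
        rw [hd]
        simp only [List.length_cons] at h
        rw [ih rest [] (cur.reverse :: acc) (Nat.lt_of_succ_lt_succ h)]
        simp only [List.reverse_nil]
        rw [consHead_nil_of_ne _ (mySplit_ne_nil rest)]
        simp only [List.reverse_cons, List.append_assoc, List.singleton_append, mySplit, consHead]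
        rcases hm : mySplit rest with _ | ⟨a, b⟩
        · exact absurd hm (mySplit_ne_nil rest)
        · simp
      · have hp : List.isPrefixOf ['-'] (c :: rest) = false := by
          simp [List.isPrefixOf]; exact fun hh => hc hh.symm
        rw [PySem.Chars.splitOn.go, if_neg (by simp [hp])]
        simp only [List.length_cons] at h
        rw [ih rest (c :: cur) acc (Nat.lt_of_succ_lt_succ h)]
        rcases hm : mySplit rest with _ | ⟨h0, t0⟩
        · exact absurd hm (mySplit_ne_nil rest)
        · simp [mySplit, hc, hm, consHead]

theorem splitOn_eq_mySplit (cs : List Char) :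
    PySem.Chars.splitOn cs ['-'] = mySplit cs := by
  unfold PySem.Chars.splitOn
  rw [go_eq (cs.length + 1) cs [] [] (by omega)]
  simp [consHead_nil_of_ne _ (mySplit_ne_nil cs)]

theorem inner_eq_all (parts : List (List Char)) :
    isShortInner (parts.map String.ofList) = parts.all okL := by
  induction parts with
  | nil => simp [isShortInner]
  | cons p ps ih =>
    simp only [List.map_cons, isShortInner, List.all_cons, okL]
    have h1 : PySem.Str.len (String.ofList p) = (p.length : Int) := by
      simp [PySem.Str.len_eq]
    have h2 : PySem.Str.endswith (String.ofList p) "." = PySem.Chars.endswith p ['.'] := by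
      simp [PySem.Str.endswith_eq]
    rw [h1, h2]
    by_cases hb : (((p.length : Int) == 2 && PySem.Chars.endswith p ['.']) || (p.length : Int) == 1) = true
    · simp [hb, ih]
    · simp only [Bool.not_eq_true] at hb
      simp [hb]

theorem key_eq (cs : List Char) : (mySplit cs).all okL = tokB cs := by
  induction cs using tokB.induct with
  | case1 => simp [mySplit, tokB.eq_def, okL]
  | case2 rest => simp [mySplit, tokB.eq_def, okL]
  | case3 c hc => simp [mySplit, tokB.eq_def, hc, okL]
  | case4 c hc =>
    simp [mySplit, tokB.eq_def, hc, okL, PySem.Chars.endswith, List.isSuffixOf, List.isPrefixOf]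
  | case5 c hc r2 ih =>
    have hs : mySplit (c :: '.' :: '-' :: r2) = [c, '.'] :: mySplit r2 := by
      simp [mySplit, hc]
    rw [hs, List.all_cons, ih]
    conv_rhs => rw [tokB.eq_def]
    simp [hc, okL, PySem.Chars.endswith, List.isSuffixOf, List.isPrefixOf]
  | case6 c hc d r2 hd =>
    rcases hm : mySplit r2 with _ | ⟨h0, t0⟩
    · exact absurd hm (mySplit_ne_nil r2)
    · have hs : mySplit (c :: '.' :: d :: r2) = (c :: '.' :: d :: h0) :: t0 := by
        simp [mySplit, hc, hd, hm]
      rw [hs, List.all_cons]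
      have hko : okL (c :: '.' :: d :: h0) = false := by
        simp only [okL, List.length_cons]
        simp only [Bool.or_eq_false_iff, Bool.and_eq_false_iff]
        constructor
        · left; simp; omega
        · simp; omega
      simp [hko, tokB.eq_def, hc, hd]
  | case7 c hc r2 h1 h2 ih =>
    have hs : mySplit (c :: '-' :: r2) = [c] :: mySplit r2 := by
      simp [mySplit, hc]
    rw [hs, List.all_cons, ih]
    conv_rhs => rw [tokB.eq_def]
    simp [hc, okL]
  | case8 c hc d r2 h1 h2 hd =>
    have hdot : d ≠ '.' := by
      intro he; cases r2 with
      | nil => exact h1 he rfl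
      | cons a t => exact h2 a t he rfl
    rcases hm : mySplit r2 with _ | ⟨h0, t0⟩
    · exact absurd hm (mySplit_ne_nil r2)
    · have hs : mySplit (c :: d :: r2) = (c :: d :: h0) :: t0 := by
        simp [mySplit, hc, hd, hm]
      rw [hs, List.all_cons]
      have hko : okL (c :: d :: h0) = false := by
        cases h0 with
        | nil =>
          simp [okL, PySem.Chars.endswith, List.isSuffixOf, List.isPrefixOf, Ne.symm hdot]
        | cons e t =>
          simp only [okL, List.length_cons]
          simp only [Bool.or_eq_false_iff, Bool.and_eq_false_iff]
          constructor
          · left; simp; omega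
          · simp; omega
      simp [hko, tokB.eq_def, hc, hd]

theorem token_eq (x : String) :
    isShortInner ((PySem.Str.split? x "-").getD []) = tokB x.toList := by
  have : PySem.Str.split? x "-" =
      some ((PySem.Chars.splitOn x.toList ['-']).map String.ofList) := by
    simp [PySem.Str.split?, PySem.Chars.split?]
  rw [this]
  simp only [Option.getD_some]
  rw [splitOn_eq_mySplit, inner_eq_all, key_eq]

theorem outer_any (l : List String) :
    isShortOuter l = l.any (fun x => tokB x.toList) := by
  induction l with
  | nil => simp [isShortOuter]
  | cons x xs ih =>
    simp only [isShortOuter, List.any_cons, ih, token_eq]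
    by_cases h : tokB x.toList = true <;> simp [h]

-- ===== VERDICT (by name: the statement is the Claim_ definition above) =====
theorem isShort_spec : Claim_equal_isShort := by
  intro name _
  unfold Spec_isShort isShort isShort_alt
  exact outer_any (PySem.Str.split₀ name)
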